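-- pv_equiv track=rewrite | github.com/Luminous-Dynamics/kosmic-lab-research | experiments/llm_k_index/track_m6_k_topo_llm.py | generate_recursive_conversation
-- ===== SOURCE A (Python) =====
-- from typing import Dict, List, Optional, Tuple
--
-- def generate_recursive_conversation(n_turns: int = 50) -> List[Tuple[str, str]]:
--     """
--     Generate a conversation where each turn references previous turns.
--
--     This creates a self-referential structure that should exhibit
--     operational closure if the LLM maintains coherence.
--
--     Args:
--         n_turns: Number of conversation turns
--
--     Returns:
--         List of (topic, prompt) pairs
--     """
--     conversation_plan = []
--
--     # Opening: Establish topic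
--     conversation_plan.append((
--         "introduction",
--         "Let's explore the nature of consciousness together. What do you think consciousness is?"
--     ))
--
--     # Build up: Add complexity
--     for i in range(2, min(10, n_turns)):
--         conversation_plan.append((
--             f"elaboration_{i}",
--             f"Building on your previous response, how does that relate to self-awareness?"
--         ))
--
--     # Middle: Reference earlier points
--     for i in range(10, min(25, n_turns)):
--         conversation_plan.append((
--             f"integration_{i}",
--             "Can you connect what you just said with your earlier point about consciousness?"
--         ))
--
--     # Later: Synthesize and loop back
--     for i in range(25, min(40, n_turns)):
--         conversation_plan.append((
--             f"synthesis_{i}",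
--             "How does this entire discussion reflect back on your initial definition?"
--         ))
--
--     # End: Explicit self-reference
--     for i in range(40, n_turns):
--         conversation_plan.append((
--             f"closure_{i}",
--             "Reflecting on our entire conversation, has your understanding evolved? How?"
--         ))
--
--     return conversation_plan
-- ===== SOURCE B (Python) =====
-- def generate_recursive_conversation(n_turns: int = 50):
--     def turn(i):
--         if i < 10:
--             return (f"elaboration_{i}",
--                     "Building on your previous response, how does that relate to self-awareness?")
--         if i < 25:
--             return (f"integration_{i}",
--                     "Can you connect what you just said with your earlier point about consciousness?")
--         if i < 40:
--             return (f"synthesis_{i}",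
--                     "How does this entire discussion reflect back on your initial definition?")
--         return (f"closure_{i}",
--                 "Reflecting on our entire conversation, has your understanding evolved? How?")
--     return [(
--         "introduction",
--         "Let's explore the nature of consciousness together. What do you think consciousness is?"
--     )] + [turn(i) for i in range(2, n_turns)]
-- ===== Notes on version B (the rewrite author's own statement) =====
-- stated objective: simpler
-- what changed: Instead of four staged loops over hand-capped sub-ranges, B makes one pass over range(2, n_turns) and classifies each turn index by threshold comparisons to pick its label and prompt.
import Mathlib
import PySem

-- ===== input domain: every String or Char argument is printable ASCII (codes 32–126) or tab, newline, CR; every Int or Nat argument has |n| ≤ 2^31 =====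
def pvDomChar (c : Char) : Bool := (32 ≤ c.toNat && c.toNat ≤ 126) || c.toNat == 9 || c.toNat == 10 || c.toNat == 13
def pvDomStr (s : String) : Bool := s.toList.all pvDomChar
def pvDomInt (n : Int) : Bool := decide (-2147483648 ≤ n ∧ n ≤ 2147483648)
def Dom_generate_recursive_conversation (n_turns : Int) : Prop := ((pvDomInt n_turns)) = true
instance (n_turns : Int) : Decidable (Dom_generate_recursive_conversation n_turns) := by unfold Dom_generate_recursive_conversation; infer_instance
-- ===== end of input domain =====

-- B replaces A's four staged loops over capped sub-ranges with one pass over range(2, n_turns)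
-- that classifies each index by threshold comparisons (simpler decomposition, same cost).

-- ===== PORT A =====
def generate_recursive_conversation (n_turns : Int) : List (String × String) :=
  let plan : List (String × String) :=
    [("introduction", "Let's explore the nature of consciousness together. What do you think consciousness is?")]
  let plan := (PySem.List.pyRange 2 (min 10 n_turns) 1).foldl
    (fun acc i => acc ++ [("elaboration_" ++ PySem.Int.toStr i,
      "Building on your previous response, how does that relate to self-awareness?")]) plan
  let plan := (PySem.List.pyRange 10 (min 25 n_turns) 1).foldl
    (fun acc i => acc ++ [("integration_" ++ PySem.Int.toStr i,
      "Can you connect what you just said with your earlier point about consciousness?")]) plan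
  let plan := (PySem.List.pyRange 25 (min 40 n_turns) 1).foldl
    (fun acc i => acc ++ [("synthesis_" ++ PySem.Int.toStr i,
      "How does this entire discussion reflect back on your initial definition?")]) plan
  let plan := (PySem.List.pyRange 40 n_turns 1).foldl
    (fun acc i => acc ++ [("closure_" ++ PySem.Int.toStr i,
      "Reflecting on our entire conversation, has your understanding evolved? How?")]) plan
  plan

-- ===== PORT B =====
def pvTurn (i : Int) : String × String :=
  if i < 10 then
    ("elaboration_" ++ PySem.Int.toStr i,
     "Building on your previous response, how does that relate to self-awareness?")
  else if i < 25 then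
    ("integration_" ++ PySem.Int.toStr i,
     "Can you connect what you just said with your earlier point about consciousness?")
  else if i < 40 then
    ("synthesis_" ++ PySem.Int.toStr i,
     "How does this entire discussion reflect back on your initial definition?")
  else
    ("closure_" ++ PySem.Int.toStr i,
     "Reflecting on our entire conversation, has your understanding evolved? How?")

def generate_recursive_conversation_alt (n_turns : Int) : List (String × String) :=
  [("introduction", "Let's explore the nature of consciousness together. What do you think consciousness is?")]
    ++ (PySem.List.pyRange 2 n_turns 1).map pvTurn

-- ===== PRECONDITION & SPEC =====
def Spec_generate_recursive_conversation (n_turns : Int) (out : List (String × String)) : Prop := out = generate_recursive_conversation_alt n_turns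
instance (n_turns : Int) (out : List (String × String)) : Decidable (Spec_generate_recursive_conversation n_turns out) := by unfold Spec_generate_recursive_conversation; infer_instance

-- ===== CLAIM (what is proved, stated in full; the proofs are below) =====
def Claim_equal_generate_recursive_conversation : Prop := ∀ (n_turns : Int), Dom_generate_recursive_conversation n_turns → Spec_generate_recursive_conversation n_turns (generate_recursive_conversation n_turns)

-- ===== LEMMAS AND PROOFS =====

theorem pv_foldl_append_map {α β : Type} (f : α → β) (l : List α) (init : List β) :
    l.foldl (fun acc i => acc ++ [f i]) init = init ++ l.map f := by
  induction l generalizing init with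
  | nil => simp
  | cons a t ih => simp [List.foldl, ih]

theorem pv_map_congr_mem {α β : Type} {f g : α → β} {l : List α}
    (h : ∀ x ∈ l, f x = g x) : l.map f = l.map g := List.map_congr_left h

-- split range(2, n) into the four segments A iterates over
theorem pv_range_split (n : Int) :
    PySem.List.pyRange 2 n 1 =
      PySem.List.pyRange 2 (min 10 n) 1 ++ PySem.List.pyRange 10 (min 25 n) 1
        ++ PySem.List.pyRange 25 (min 40 n) 1 ++ PySem.List.pyRange 40 n 1 := by
  by_cases h : n ≤ 2
  · rw [PySem.List.pyRange_one_eq_nil h,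
        PySem.List.pyRange_one_eq_nil (by omega : min 10 n ≤ 2),
        PySem.List.pyRange_one_eq_nil (by omega : min 25 n ≤ 10),
        PySem.List.pyRange_one_eq_nil (by omega : min 40 n ≤ 25),
        PySem.List.pyRange_one_eq_nil (by omega : n ≤ 40)]
    simp
  by_cases h10 : n ≤ 10
  · rw [show min 10 n = n by omega,
        PySem.List.pyRange_one_eq_nil (by omega : min 25 n ≤ 10),
        PySem.List.pyRange_one_eq_nil (by omega : min 40 n ≤ 25),
        PySem.List.pyRange_one_eq_nil (by omega : n ≤ 40)]
    simp
  by_cases h25 : n ≤ 25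
  · rw [show min 10 n = 10 by omega, show min 25 n = n by omega,
        PySem.List.pyRange_one_eq_nil (by omega : min 40 n ≤ 25),
        PySem.List.pyRange_one_eq_nil (by omega : n ≤ 40),
        PySem.List.pyRange_one_append 2 10 n (by omega) (by omega)]
    simp
  by_cases h40 : n ≤ 40
  · rw [show min 10 n = 10 by omega, show min 25 n = 25 by omega, show min 40 n = n by omega,
        PySem.List.pyRange_one_eq_nil (by omega : n ≤ 40),
        PySem.List.pyRange_one_append 2 10 n (by omega) (by omega),
        PySem.List.pyRange_one_append 10 25 n (by omega) (by omega)]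
    simp [List.append_assoc]
  · rw [show min 10 n = 10 by omega, show min 25 n = 25 by omega, show min 40 n = 40 by omega,
        PySem.List.pyRange_one_append 2 10 n (by omega) (by omega),
        PySem.List.pyRange_one_append 10 25 n (by omega) (by omega),
        PySem.List.pyRange_one_append 25 40 n (by omega) (by omega)]
    simp [List.append_assoc]

-- ===== VERDICT (by name: the statement is the Claim_ definition above) =====
theorem generate_recursive_conversation_spec : Claim_equal_generate_recursive_conversation := by
  intro n _
  unfold Spec_generate_recursive_conversation generate_recursive_conversation generate_recursive_conversation_alt
  simp only [pv_foldl_append_map, List.append_assoc]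
  rw [pv_range_split n]
  have e1 : List.map
      (fun i => (("elaboration_" ++ PySem.Int.toStr i : String),
        ("Building on your previous response, how does that relate to self-awareness?" : String)))
      (PySem.List.pyRange 2 (min 10 n) 1) = List.map pvTurn (PySem.List.pyRange 2 (min 10 n) 1) :=
    pv_map_congr_mem (fun x hx => by
      rw [PySem.List.mem_pyRange_one] at hx
      simp [pvTurn, show x < 10 by omega])
  have e2 : List.map
      (fun i => (("integration_" ++ PySem.Int.toStr i : String),
        ("Can you connect what you just said with your earlier point about consciousness?" : String)))
      (PySem.List.pyRange 10 (min 25 n) 1) = List.map pvTurn (PySem.List.pyRange 10 (min 25 n) 1) :=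
    pv_map_congr_mem (fun x hx => by
      rw [PySem.List.mem_pyRange_one] at hx
      simp [pvTurn, show ¬ x < 10 by omega, show x < 25 by omega])
  have e3 : List.map
      (fun i => (("synthesis_" ++ PySem.Int.toStr i : String),
        ("How does this entire discussion reflect back on your initial definition?" : String)))
      (PySem.List.pyRange 25 (min 40 n) 1) = List.map pvTurn (PySem.List.pyRange 25 (min 40 n) 1) :=
    pv_map_congr_mem (fun x hx => by
      rw [PySem.List.mem_pyRange_one] at hx
      simp [pvTurn, show ¬ x < 10 by omega, show ¬ x < 25 by omega, show x < 40 by omega])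
  have e4 : List.map
      (fun i => (("closure_" ++ PySem.Int.toStr i : String),
        ("Reflecting on our entire conversation, has your understanding evolved? How?" : String)))
      (PySem.List.pyRange 40 n 1) = List.map pvTurn (PySem.List.pyRange 40 n 1) :=
    pv_map_congr_mem (fun x hx => by
      rw [PySem.List.mem_pyRange_one] at hx
      simp [pvTurn, show ¬ x < 10 by omega, show ¬ x < 25 by omega, show ¬ x < 40 by omega])
  simp only [List.map_append, List.append_assoc, e1, e2, e3, e4]
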